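-- pv_equiv track=rewrite | github.com/Darwin1401/LTTT | baocaodoan.py | is_valid_grammar
-- ===== SOURCE A (Python) =====
-- def is_valid_grammar(Variables, Terminal, Production, Start):
--
--     if len(Variables) == 0:
--         return False
--
--     for character in Variables:
--         if len(character) > 1:
--             return False
--
--     if len(Terminal) == 0:
--         return False
--
--     for character in Terminal:
--         if len(character) > 1:
--             return False
--
--     for i in Terminal:
--         if i in Variables:
--             return False
--
--     if len(Production) == 0:
--         return False
--
--     for item in Production:
--         for key in item.keys():
--             flag = False
--             for i in key:
--                 if i in Variables:
--                     flag = True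
--                     break
--             if not flag: return False
--
--     for item in Production:
--         for key, value in item.items():
--             for i in key:
--                 if i not in Variables and i not in Terminal:
--                     return False
--             for i in value:
--                 if i not in Variables and i not in Terminal:
--                     return False
--
--     if len(Start) == 0 or Start not in Variables:
--         return False
--
--     key = list()
--     for item in Production:
--         for i in item.keys():
--             key.append(i)
--     if Start not in key: # Kiem tra trong cac quy tac sinh phai co quy tac sinh ra tu bien khoi dau
--         return False
--
--     return True
-- ===== SOURCE B (Python) =====
-- def is_valid_grammar(Variables, Terminal, Production, Start):
--     if not Variables or not Terminal or not Production:
--         return False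
--     # classification index: single-char symbol -> True (variable) / False (terminal)
--     kind = {}
--     for t in Terminal:
--         if len(t) > 1:
--             return False
--         kind[t] = False
--     for v in Variables:
--         if len(v) > 1:
--             return False
--         if kind.get(v) is False:  # v is also a terminal
--             return False
--         kind[v] = True
--     if len(Start) == 0 or kind.get(Start) is not True:
--         return False
--     seen_keys = set()
--     for item in Production:
--         for key, value in item.items():
--             has_var = False
--             for ch in key:
--                 isv = kind.get(ch)
--                 if isv is None:
--                     return False
--                 if isv:
--                     has_var = True
--             if not has_var:
--                 return False
--             if not all(ch in kind for ch in value):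
--                 return False
--             seen_keys.add(key)
--     return Start in seen_keys
-- ===== Notes on version B (the rewrite author's own statement) =====
-- stated objective: alternative
-- what changed: B builds a classification dictionary (single-char symbol -> is-variable, detecting the Terminal/Variables overlap while inserting) and a set of production keys, so the repeated linear list-membership scans of A disappear and the three passes over Production become one accumulating pass.
import Mathlib
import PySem

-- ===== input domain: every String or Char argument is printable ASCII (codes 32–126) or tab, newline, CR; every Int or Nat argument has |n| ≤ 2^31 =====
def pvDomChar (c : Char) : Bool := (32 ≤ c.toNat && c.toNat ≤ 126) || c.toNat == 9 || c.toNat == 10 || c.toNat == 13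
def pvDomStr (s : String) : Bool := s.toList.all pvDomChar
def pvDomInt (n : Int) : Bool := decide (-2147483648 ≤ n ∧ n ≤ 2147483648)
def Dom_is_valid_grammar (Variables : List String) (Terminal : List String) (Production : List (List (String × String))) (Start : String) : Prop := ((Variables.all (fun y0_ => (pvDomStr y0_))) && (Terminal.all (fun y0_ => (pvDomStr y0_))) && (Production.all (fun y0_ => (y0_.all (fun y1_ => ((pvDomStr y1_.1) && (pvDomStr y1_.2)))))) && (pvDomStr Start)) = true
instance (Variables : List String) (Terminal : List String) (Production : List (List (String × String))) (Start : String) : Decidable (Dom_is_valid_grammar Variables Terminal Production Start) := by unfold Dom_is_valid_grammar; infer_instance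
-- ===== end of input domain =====

-- Header: B replaces A's repeated list-membership scans and three Production passes by a symbol-classification
-- dictionary built once plus one accumulating pass collecting the production keys into a set; objective: alternative.
-- Shared input decoding: a Python dict argument arrives as an association list (later value wins, Python dict semantics).
def pyDict (item : List (String × String)) : PySem.Dict String String :=
  item.foldl (fun d p => d.insert p.1 p.2) PySem.Dict.empty

-- ===== PORT A =====
-- for character in L: if len(character) > 1: return False  (true = fell through)
def aLenLoop : List String → Bool
  | [] => true
  | c :: rest => if 1 < PySem.Str.len c then false else aLenLoop rest

-- for i in Terminal: if i in Variables: return False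
def aMemLoop (V : List String) : List String → Bool
  | [] => true
  | i :: rest => if V.contains i then false else aMemLoop V rest

-- flag = False; for i in key: if i in Variables: flag = True; break
def aFlagLoop (V : List String) : List Char → Bool
  | [] => false
  | i :: rest => if V.contains (String.singleton i) then true else aFlagLoop V rest

-- for key in item.keys(): ... if not flag: return False
def aKeysLoop (V : List String) : List String → Bool
  | [] => true
  | k :: rest => if aFlagLoop V k.toList then aKeysLoop V rest else false

-- first loop over Production
def aLoop4 (V : List String) : List (List (String × String)) → Bool
  | [] => true
  | item :: rest => if aKeysLoop V (pyDict item).keys then aLoop4 V rest else false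

-- for i in s: if i not in Variables and i not in Terminal: return False
def aCharLoop (V T : List String) : List Char → Bool
  | [] => true
  | i :: rest =>
      if !(V.contains (String.singleton i)) && !(T.contains (String.singleton i)) then false
      else aCharLoop V T rest

-- for key, value in item.items(): ...
def aItemsLoop (V T : List String) : List (String × String) → Bool
  | [] => true
  | (k, v) :: rest =>
      if !(aCharLoop V T k.toList) then false
      else if !(aCharLoop V T v.toList) then false
      else aItemsLoop V T rest

-- second loop over Production
def aLoop5 (V T : List String) : List (List (String × String)) → Bool
  | [] => true
  | item :: rest => if aItemsLoop V T (pyDict item).items then aLoop5 V T rest else false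

-- key = list(); for item in Production: for i in item.keys(): key.append(i)
def aKeysOf (P : List (List (String × String))) : List String :=
  P.foldl (fun acc item => acc ++ (pyDict item).keys) []

def is_valid_grammar (Variables : List String) (Terminal : List String) (Production : List (List (String × String))) (Start : String) : Bool :=
  if Variables.length == 0 then false
  else if !(aLenLoop Variables) then false
  else if Terminal.length == 0 then false
  else if !(aLenLoop Terminal) then false
  else if !(aMemLoop Variables Terminal) then false
  else if Production.length == 0 then false
  else if !(aLoop4 Variables Production) then false
  else if !(aLoop5 Variables Terminal Production) then false
  else if PySem.Str.len Start == 0 || !(Variables.contains Start) then false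
  else if !((aKeysOf Production).contains Start) then false
  else true

-- ===== PORT B =====
-- for t in Terminal: if len(t) > 1: return False; kind[t] = False   (none = early return False)
def bBuildT : List String → PySem.Dict String Bool → Option (PySem.Dict String Bool)
  | [], d => some d
  | t :: rest, d =>
      if 1 < PySem.Str.len t then none
      else bBuildT rest (d.insert t false)

-- for v in Variables: if len(v) > 1: return False; if kind.get(v) is False: return False; kind[v] = True
def bBuildV : List String → PySem.Dict String Bool → Option (PySem.Dict String Bool)
  | [], d => some d
  | v :: rest, d =>
      if 1 < PySem.Str.len v then none
      else if d.get? v == some false then none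
      else bBuildV rest (d.insert v true)

-- has_var = False; for ch in key: isv = kind.get(ch); if isv is None: return False; if isv: has_var = True
def bKeyScan (kind : PySem.Dict String Bool) : List Char → Bool → Option Bool
  | [], hv => some hv
  | ch :: rest, hv =>
      match kind.get? (String.singleton ch) with
      | none => none
      | some b => bKeyScan kind rest (hv || b)

-- for key, value in item.items(): … ; seen_keys.add(key)
def bItemLoop (kind : PySem.Dict String Bool) :
    List (String × String) → PySem.Set String → Option (PySem.Set String)
  | [], ks => some ks
  | (k, v) :: rest, ks =>
      match bKeyScan kind k.toList false with
      | none => none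
      | some hv =>
          if !hv then none
          else if !(v.toList.all fun ch => kind.contains (String.singleton ch)) then none
          else bItemLoop kind rest (PySem.Set.add ks k)

-- for item in Production: …
def bProdLoop (kind : PySem.Dict String Bool) :
    List (List (String × String)) → PySem.Set String → Option (PySem.Set String)
  | [], ks => some ks
  | item :: rest, ks =>
      match bItemLoop kind (pyDict item).items ks with
      | none => none
      | some ks' => bProdLoop kind rest ks'

def is_valid_grammar_alt (Variables : List String) (Terminal : List String) (Production : List (List (String × String))) (Start : String) : Bool :=
  if Variables.isEmpty || Terminal.isEmpty || Production.isEmpty then false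
  else
    match bBuildT Terminal PySem.Dict.empty with
    | none => false
    | some d0 =>
        match bBuildV Variables d0 with
        | none => false
        | some kind =>
            if PySem.Str.len Start == 0 || !(kind.get? Start == some true) then false
            else
              match bProdLoop kind Production PySem.Set.empty with
              | none => false
              | some ks => PySem.Set.contains ks Start

-- ===== PRECONDITION & SPEC =====
def Spec_is_valid_grammar (Variables : List String) (Terminal : List String) (Production : List (List (String × String))) (Start : String) (out : Bool) : Prop := out = is_valid_grammar_alt Variables Terminal Production Start
instance (Variables : List String) (Terminal : List String) (Production : List (List (String × String))) (Start : String) (out : Bool) : Decidable (Spec_is_valid_grammar Variables Terminal Production Start out) := by unfold Spec_is_valid_grammar; infer_instance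

-- ===== CLAIM (what is proved, stated in full; the proofs are below) =====
def Claim_equal_is_valid_grammar : Prop := ∀ (Variables : List String) (Terminal : List String) (Production : List (List (String × String))) (Start : String), Dom_is_valid_grammar Variables Terminal Production Start → Spec_is_valid_grammar Variables Terminal Production Start (is_valid_grammar Variables Terminal Production Start)

-- ===== LEMMAS AND PROOFS =====
theorem pv_ite_false (c x : Bool) : (if c = true then false else x) = (!c && x) := by
  cases c <;> simp

theorem pv_len_beq_zero {α : Type} (l : List α) : (l.length == 0) = l.isEmpty := by
  cases l <;> rfl

theorem pv_all_and {α : Type} (l : List α) (f g : α → Bool) :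
    l.all (fun x => f x && g x) = (l.all f && l.all g) := by
  induction l with
  | nil => rfl
  | cons a r ih =>
      rw [List.all_cons, List.all_cons, List.all_cons, ih]
      cases f a <;> cases g a <;> cases r.all f <;> cases r.all g <;> rfl

theorem pv_any_or {α : Type} (l : List α) (f g : α → Bool) :
    l.any (fun x => f x || g x) = (l.any f || l.any g) := by
  induction l with
  | nil => rfl
  | cons a r ih =>
      rw [List.any_cons, List.any_cons, List.any_cons, ih]
      cases f a <;> cases g a <;> cases r.any f <;> cases r.any g <;> rfl

theorem pv_any_comm (T V : List String) :
    (T.any fun i => V.contains i) = (V.any fun i => T.contains i) := by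
  rw [Bool.eq_iff_iff]
  simp only [List.any_eq_true, List.contains_iff_mem]
  tauto

theorem pv_keys_all (d : PySem.Dict String String) (f : String → Bool) :
    d.keys.all f = d.items.all (fun p => f p.1) := by
  simp [PySem.Dict.keys, List.all_map, Function.comp_def]

theorem pv_contains_append (l1 l2 : List String) (S : String) :
    (l1 ++ l2).contains S = (l1.contains S || l2.contains S) := by
  by_cases h1 : S ∈ l1 <;> by_cases h2 : S ∈ l2 <;> simp [h1, h2]

theorem pv_map_fst_contains (l : List (String × String)) (S : String) :
    (l.map (fun p => p.1)).contains S = l.any (fun p => p.1 == S) := by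
  induction l with
  | nil => rfl
  | cons p r ih =>
      rw [List.map_cons, List.contains_cons, ih, List.any_cons]
      by_cases h : S = p.1
      · simp [h]
      · have e1 : (S == p.1) = false := by rw [beq_eq_false_iff_ne]; exact h
        have e2 : (p.1 == S) = false := by rw [beq_eq_false_iff_ne]; exact fun e => h e.symm
        rw [e1, e2]

theorem pv_keys_contains (d : PySem.Dict String String) (S : String) :
    d.keys.contains S = d.items.any (fun p => p.1 == S) := by
  rw [PySem.Dict.keys, pv_map_fst_contains]

theorem aLenLoop_eq (L : List String) :
    aLenLoop L = !(L.any fun c => decide (1 < PySem.Str.len c)) := by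
  induction L with
  | nil => rfl
  | cons c rest ih =>
      rw [aLenLoop]
      by_cases h : 1 < PySem.Str.len c
      · rw [if_pos h]
        simp only [List.any_cons, decide_eq_true h, Bool.true_or, Bool.not_true]
      · rw [if_neg h, ih]
        simp only [List.any_cons, decide_eq_false h, Bool.false_or]

theorem aMemLoop_eq (V L : List String) :
    aMemLoop V L = !(L.any fun i => V.contains i) := by
  induction L with
  | nil => rfl
  | cons i rest ih =>
      rw [aMemLoop]
      cases h : V.contains i with
      | true =>
          rw [if_pos rfl]
          simp only [List.any_cons, h, Bool.true_or, Bool.not_true]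
      | false =>
          rw [if_neg (by simp), ih]
          simp only [List.any_cons, h, Bool.false_or]

theorem aFlagLoop_eq (V : List String) (cs : List Char) :
    aFlagLoop V cs = cs.any (fun i => V.contains (String.singleton i)) := by
  induction cs with
  | nil => rfl
  | cons i rest ih =>
      rw [aFlagLoop]
      cases h : V.contains (String.singleton i) with
      | true =>
          rw [if_pos rfl]
          simp only [List.any_cons, h, Bool.true_or]
      | false =>
          rw [if_neg (by simp), ih]
          simp only [List.any_cons, h, Bool.false_or]

theorem aKeysLoop_eq (V : List String) (ks : List String) :
    aKeysLoop V ks = ks.all (fun k => k.toList.any (fun i => V.contains (String.singleton i))) := by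
  induction ks with
  | nil => rfl
  | cons k rest ih =>
      rw [aKeysLoop, aFlagLoop_eq]
      cases h : k.toList.any (fun i => V.contains (String.singleton i)) with
      | true =>
          rw [if_pos rfl, ih]
          simp only [List.all_cons, h, Bool.true_and]
      | false =>
          rw [if_neg (by simp)]
          simp only [List.all_cons, h, Bool.false_and]

theorem aLoop4_eq (V : List String) (P : List (List (String × String))) :
    aLoop4 V P = P.all (fun item => (pyDict item).items.all
      (fun p => p.1.toList.any (fun i => V.contains (String.singleton i)))) := by
  induction P with
  | nil => rfl
  | cons item rest ih =>
      rw [aLoop4, aKeysLoop_eq]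
      simp only [pv_keys_all]
      cases h : (pyDict item).items.all
          (fun p => p.1.toList.any (fun i => V.contains (String.singleton i))) with
      | true =>
          rw [if_pos rfl, ih]
          simp only [List.all_cons, h, Bool.true_and]
      | false =>
          rw [if_neg (by simp)]
          simp only [List.all_cons, h, Bool.false_and]

theorem aCharLoop_eq (V T : List String) (cs : List Char) :
    aCharLoop V T cs = cs.all
      (fun i => V.contains (String.singleton i) || T.contains (String.singleton i)) := by
  induction cs with
  | nil => rfl
  | cons i rest ih =>
      rw [aCharLoop]
      cases hv : V.contains (String.singleton i) with
      | true =>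
          rw [if_neg (by simp), ih]
          simp only [List.all_cons, hv, Bool.true_or, Bool.true_and]
      | false =>
          cases ht : T.contains (String.singleton i) with
          | true =>
              rw [if_neg (by simp), ih]
              simp only [List.all_cons, hv, ht, Bool.false_or, Bool.true_and]
          | false =>
              rw [if_pos (by decide)]
              simp only [List.all_cons, hv, ht, Bool.false_or, Bool.false_and]

theorem aItemsLoop_eq (V T : List String) (l : List (String × String)) :
    aItemsLoop V T l = l.all (fun p => (p.1.toList ++ p.2.toList).all
      (fun i => V.contains (String.singleton i) || T.contains (String.singleton i))) := by
  induction l with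
  | nil => rfl
  | cons p rest ih =>
      obtain ⟨k, v⟩ := p
      rw [aItemsLoop, aCharLoop_eq, aCharLoop_eq]
      cases h1 : k.toList.all
          (fun i => V.contains (String.singleton i) || T.contains (String.singleton i)) with
      | false =>
          rw [if_pos (by decide)]
          simp only [List.all_cons, List.all_append, h1, Bool.false_and]
      | true =>
          rw [if_neg (by simp)]
          cases h2 : v.toList.all
              (fun i => V.contains (String.singleton i) || T.contains (String.singleton i)) with
          | false =>
              rw [if_pos (by decide)]
              simp only [List.all_cons, List.all_append, h1, h2, Bool.and_false, Bool.false_and]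
          | true =>
              rw [if_neg (by simp), ih]
              simp only [List.all_cons, List.all_append, h1, h2, Bool.true_and]

theorem aLoop5_eq (V T : List String) (P : List (List (String × String))) :
    aLoop5 V T P = P.all (fun item => (pyDict item).items.all
      (fun p => (p.1.toList ++ p.2.toList).all
        (fun i => V.contains (String.singleton i) || T.contains (String.singleton i)))) := by
  induction P with
  | nil => rfl
  | cons item rest ih =>
      rw [aLoop5, aItemsLoop_eq]
      cases h : (pyDict item).items.all
          (fun p => (p.1.toList ++ p.2.toList).all
            (fun i => V.contains (String.singleton i) || T.contains (String.singleton i))) with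
      | true =>
          rw [if_pos rfl, ih]
          simp only [List.all_cons, h, Bool.true_and]
      | false =>
          rw [if_neg (by simp)]
          simp only [List.all_cons, h, Bool.false_and]

theorem aKeysOf_go (P : List (List (String × String))) (S : String) (acc : List String) :
    (P.foldl (fun acc item => acc ++ (pyDict item).keys) acc).contains S =
      (acc.contains S || P.any (fun item => (pyDict item).items.any (fun p => p.1 == S))) := by
  induction P generalizing acc with
  | nil => simp
  | cons item rest ih =>
      rw [List.foldl_cons, ih, pv_contains_append, pv_keys_contains, List.any_cons,
        Bool.or_assoc]

theorem aKeysOf_contains (P : List (List (String × String))) (S : String) :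
    (aKeysOf P).contains S = P.any (fun item => (pyDict item).items.any (fun p => p.1 == S)) := by
  rw [aKeysOf, aKeysOf_go]
  rw [show (([] : List String).contains S) = false from rfl, Bool.false_or]

-- ---- B-side characterizations ----
theorem bBuildT_eq (L : List String) (d : PySem.Dict String Bool) :
    bBuildT L d = if L.any (fun t => decide (1 < PySem.Str.len t)) then none
      else some (L.foldl (fun d t => d.insert t false) d) := by
  induction L generalizing d with
  | nil => rfl
  | cons t rest ih =>
      cases h : decide (1 < PySem.Str.len t) with
      | true =>
          rw [bBuildT, if_pos (of_decide_eq_true h), List.any_cons, h, Bool.true_or, if_pos rfl]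
      | false =>
          rw [bBuildT, if_neg (of_decide_eq_false h), ih, List.any_cons, h, Bool.false_or,
            List.foldl_cons]

theorem pv_get?_foldl_insert (b : Bool) (L : List String) (d : PySem.Dict String Bool)
    (s : String) :
    (L.foldl (fun d t => d.insert t b) d).get? s = if s ∈ L then some b else d.get? s := by
  induction L generalizing d with
  | nil => simp
  | cons t rest ih =>
      rw [List.foldl_cons, ih]
      by_cases hm : s ∈ rest
      · simp [hm]
      · by_cases he : s = t
        · simp [he, PySem.Dict.get?_insert_self]
        · simp [hm, he, PySem.Dict.get?_insert]

theorem bBuildV_eq (L : List String) (d : PySem.Dict String Bool) :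
    bBuildV L d = if L.any (fun v => decide (1 < PySem.Str.len v) || (d.get? v == some false))
      then none else some (L.foldl (fun d v => d.insert v true) d) := by
  induction L generalizing d with
  | nil => rfl
  | cons v rest ih =>
      rw [bBuildV]
      cases h1 : decide (1 < PySem.Str.len v) with
      | true =>
          rw [if_pos (of_decide_eq_true h1)]
          have hc : ((v :: rest).any fun w => decide (1 < PySem.Str.len w)
              || (d.get? w == some false)) = true := by
            rw [List.any_cons, h1]; rfl
          rw [hc, if_pos rfl]
      | false =>
          rw [if_neg (of_decide_eq_false h1)]
          cases h2 : (d.get? v == some false) with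
          | true =>
              rw [if_pos rfl]
              have hc : ((v :: rest).any fun w => decide (1 < PySem.Str.len w)
                  || (d.get? w == some false)) = true := by
                rw [List.any_cons, h1, h2]; rfl
              rw [hc, if_pos rfl]
          | false =>
              rw [if_neg Bool.false_ne_true, ih]
              have hcg : (rest.any fun w => decide (1 < PySem.Str.len w)
                    || ((d.insert v true).get? w == some false))
                  = (rest.any fun w => decide (1 < PySem.Str.len w) || (d.get? w == some false)) := by
                apply PySem.List.any_congr_mem
                intro w _
                by_cases he : w = v
                · subst he
                  rw [PySem.Dict.get?_insert_self, h2]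
                  rfl
                · rw [PySem.Dict.get?_insert_of_ne d true he]
              rw [hcg]
              have hc : ((v :: rest).any fun w => decide (1 < PySem.Str.len w)
                    || (d.get? w == some false))
                  = (rest.any fun w => decide (1 < PySem.Str.len w) || (d.get? w == some false)) := by
                rw [List.any_cons, h1, h2]; rfl
              rw [hc, List.foldl_cons]

theorem bKeyScan_eq (kind : PySem.Dict String Bool) (cs : List Char) (hv : Bool) :
    bKeyScan kind cs hv =
      if cs.all (fun ch => (kind.get? (String.singleton ch)).isSome)
      then some (hv || cs.any (fun ch => kind.get? (String.singleton ch) == some true))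
      else none := by
  induction cs generalizing hv with
  | nil => simp [bKeyScan]
  | cons ch rest ih =>
      rw [bKeyScan]
      cases h : kind.get? (String.singleton ch) with
      | none => simp [h]
      | some b =>
          dsimp only
          rw [ih]
          cases b <;> simp [h]

theorem bItemLoop_eq (kind : PySem.Dict String Bool) (l : List (String × String))
    (ks : PySem.Set String) :
    bItemLoop kind l ks =
      if l.all (fun p =>
          p.1.toList.all (fun ch => (kind.get? (String.singleton ch)).isSome)
          && p.1.toList.any (fun ch => kind.get? (String.singleton ch) == some true)
          && p.2.toList.all (fun ch => kind.contains (String.singleton ch)))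
      then some (l.foldl (fun ks p => PySem.Set.add ks p.1) ks) else none := by
  induction l generalizing ks with
  | nil => simp [bItemLoop]
  | cons p rest ih =>
      obtain ⟨k, v⟩ := p
      rw [bItemLoop, bKeyScan_eq]
      cases h1 : k.toList.all (fun ch => (kind.get? (String.singleton ch)).isSome) with
      | false =>
          rw [if_neg Bool.false_ne_true]
          have hc : (((k, v) :: rest).all fun p =>
              p.1.toList.all (fun ch => (kind.get? (String.singleton ch)).isSome)
              && p.1.toList.any (fun ch => kind.get? (String.singleton ch) == some true)
              && p.2.toList.all (fun ch => kind.contains (String.singleton ch))) = false := by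
            simp only [List.all_cons]
            rw [h1]
            rfl
          rw [hc, if_neg Bool.false_ne_true]
      | true =>
          rw [if_pos rfl]
          dsimp only
          cases h2 : k.toList.any (fun ch => kind.get? (String.singleton ch) == some true) with
          | false =>
              rw [Bool.false_or, Bool.not_false, if_pos rfl]
              have hc : (((k, v) :: rest).all fun p =>
                  p.1.toList.all (fun ch => (kind.get? (String.singleton ch)).isSome)
                  && p.1.toList.any (fun ch => kind.get? (String.singleton ch) == some true)
                  && p.2.toList.all (fun ch => kind.contains (String.singleton ch))) = false := by
                simp only [List.all_cons]
                rw [h1, h2]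
                rfl
              rw [hc, if_neg Bool.false_ne_true]
          | true =>
              rw [Bool.false_or, Bool.not_true, if_neg Bool.false_ne_true]
              cases h3 : v.toList.all (fun ch => kind.contains (String.singleton ch)) with
              | false =>
                  rw [Bool.not_false, if_pos rfl]
                  have hc : (((k, v) :: rest).all fun p =>
                      p.1.toList.all (fun ch => (kind.get? (String.singleton ch)).isSome)
                      && p.1.toList.any (fun ch => kind.get? (String.singleton ch) == some true)
                      && p.2.toList.all (fun ch => kind.contains (String.singleton ch))) = false := by
                    simp only [List.all_cons]
                    rw [h1, h2, h3]
                    rfl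
                  rw [hc, if_neg Bool.false_ne_true]
              | true =>
                  rw [Bool.not_true, if_neg Bool.false_ne_true, ih]
                  have hc : (((k, v) :: rest).all fun p =>
                      p.1.toList.all (fun ch => (kind.get? (String.singleton ch)).isSome)
                      && p.1.toList.any (fun ch => kind.get? (String.singleton ch) == some true)
                      && p.2.toList.all (fun ch => kind.contains (String.singleton ch)))
                      = (rest.all fun p =>
                      p.1.toList.all (fun ch => (kind.get? (String.singleton ch)).isSome)
                      && p.1.toList.any (fun ch => kind.get? (String.singleton ch) == some true)
                      && p.2.toList.all (fun ch => kind.contains (String.singleton ch))) := by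
                    simp only [List.all_cons]
                    rw [h1, h2, h3]
                    rfl
                  rw [hc, List.foldl_cons]

theorem bProdLoop_eq (kind : PySem.Dict String Bool) (P : List (List (String × String)))
    (ks : PySem.Set String) :
    bProdLoop kind P ks =
      if P.all (fun item => (pyDict item).items.all (fun p =>
          p.1.toList.all (fun ch => (kind.get? (String.singleton ch)).isSome)
          && p.1.toList.any (fun ch => kind.get? (String.singleton ch) == some true)
          && p.2.toList.all (fun ch => kind.contains (String.singleton ch))))
      then some (P.foldl (fun ks item =>
          (pyDict item).items.foldl (fun ks p => PySem.Set.add ks p.1) ks) ks)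
      else none := by
  induction P generalizing ks with
  | nil => simp [bProdLoop]
  | cons item rest ih =>
      rw [bProdLoop, bItemLoop_eq]
      cases h : (pyDict item).items.all (fun p =>
          p.1.toList.all (fun ch => (kind.get? (String.singleton ch)).isSome)
          && p.1.toList.any (fun ch => kind.get? (String.singleton ch) == some true)
          && p.2.toList.all (fun ch => kind.contains (String.singleton ch))) with
      | false =>
          rw [if_neg Bool.false_ne_true]
          have hc : ((item :: rest).all fun item => (pyDict item).items.all (fun p =>
              p.1.toList.all (fun ch => (kind.get? (String.singleton ch)).isSome)
              && p.1.toList.any (fun ch => kind.get? (String.singleton ch) == some true)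
              && p.2.toList.all (fun ch => kind.contains (String.singleton ch)))) = false := by
            simp only [List.all_cons]
            rw [h]
            rfl
          rw [hc, if_neg Bool.false_ne_true]
      | true =>
          rw [if_pos rfl]
          dsimp only
          rw [ih]
          have hc : ((item :: rest).all fun item => (pyDict item).items.all (fun p =>
              p.1.toList.all (fun ch => (kind.get? (String.singleton ch)).isSome)
              && p.1.toList.any (fun ch => kind.get? (String.singleton ch) == some true)
              && p.2.toList.all (fun ch => kind.contains (String.singleton ch))))
              = (rest.all fun item => (pyDict item).items.all (fun p =>
              p.1.toList.all (fun ch => (kind.get? (String.singleton ch)).isSome)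
              && p.1.toList.any (fun ch => kind.get? (String.singleton ch) == some true)
              && p.2.toList.all (fun ch => kind.contains (String.singleton ch)))) := by
            simp only [List.all_cons]
            rw [h]
            rfl
          rw [hc, List.foldl_cons]

theorem pv_contains_add (ks : PySem.Set String) (x S : String) :
    PySem.Set.contains (PySem.Set.add ks x) S = (PySem.Set.contains ks S || x == S) := by
  rw [Bool.eq_iff_iff]
  simp only [Bool.or_eq_true, beq_iff_eq, PySem.Set.contains_iff, PySem.Set.mem_add]
  constructor
  · rintro (h | h)
    · exact Or.inl h
    · exact Or.inr h.symm
  · rintro (h | h)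
    · exact Or.inl h
    · exact Or.inr h.symm

theorem pv_contains_foldl_add (l : List (String × String)) (ks : PySem.Set String) (S : String) :
    PySem.Set.contains (l.foldl (fun ks p => PySem.Set.add ks p.1) ks) S =
      (PySem.Set.contains ks S || l.any (fun p => p.1 == S)) := by
  induction l generalizing ks with
  | nil => simp
  | cons p rest ih =>
      rw [List.foldl_cons, ih, pv_contains_add, List.any_cons, Bool.or_assoc]

theorem pv_contains_prod_fold (P : List (List (String × String))) (ks : PySem.Set String)
    (S : String) :
    PySem.Set.contains (P.foldl (fun ks item =>
        (pyDict item).items.foldl (fun ks p => PySem.Set.add ks p.1) ks) ks) S =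
      (PySem.Set.contains ks S
        || P.any (fun item => (pyDict item).items.any (fun p => p.1 == S))) := by
  induction P generalizing ks with
  | nil => simp
  | cons item rest ih =>
      rw [List.foldl_cons, ih, pv_contains_foldl_add, List.any_cons, Bool.or_assoc]

-- lookups in the finished classification dictionary, expressed by list membership
theorem pv_dT_get? (T : List String) (s : String) :
    ((T.foldl (fun d t => d.insert t false) PySem.Dict.empty).get? s)
      = if s ∈ T then some false else none := by
  rw [pv_get?_foldl_insert]
  simp [PySem.Dict.get?_empty]

theorem pv_dT_false (T : List String) (v : String) :
    ((T.foldl (fun d t => d.insert t false) PySem.Dict.empty).get? v == some false)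
      = T.contains v := by
  rw [pv_dT_get?]
  by_cases h : v ∈ T <;> simp [h]

theorem pv_kind_get? (V T : List String) (s : String) :
    ((V.foldl (fun d v => d.insert v true)
        (T.foldl (fun d t => d.insert t false) PySem.Dict.empty)).get? s)
      = if s ∈ V then some true else if s ∈ T then some false else none := by
  rw [pv_get?_foldl_insert, pv_dT_get?]

theorem pv_kind_true (V T : List String) (s : String) :
    ((V.foldl (fun d v => d.insert v true)
        (T.foldl (fun d t => d.insert t false) PySem.Dict.empty)).get? s == some true)
      = V.contains s := by
  rw [pv_kind_get?]
  by_cases h1 : s ∈ V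
  · simp [h1]
  · by_cases h2 : s ∈ T <;> simp [h1, h2]

theorem pv_kind_isSome (V T : List String) (s : String) :
    ((V.foldl (fun d v => d.insert v true)
        (T.foldl (fun d t => d.insert t false) PySem.Dict.empty)).get? s).isSome
      = (V.contains s || T.contains s) := by
  rw [pv_kind_get?]
  by_cases h1 : s ∈ V
  · simp [h1]
  · by_cases h2 : s ∈ T <;> simp [h1, h2]

theorem pv_kind_contains (V T : List String) (s : String) :
    ((V.foldl (fun d v => d.insert v true)
        (T.foldl (fun d t => d.insert t false) PySem.Dict.empty)).contains s)
      = (V.contains s || T.contains s) := by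
  rw [PySem.Dict.contains_eq_isSome_get?, pv_kind_isSome]

-- B in canonical boolean form
theorem alt_eq_canon (V T : List String) (P : List (List (String × String))) (S : String) :
    is_valid_grammar_alt V T P S =
      (!(V.isEmpty || T.isEmpty || P.isEmpty)
       && !(T.any fun t => decide (1 < PySem.Str.len t))
       && !(V.any fun v => decide (1 < PySem.Str.len v) || T.contains v)
       && !(PySem.Str.len S == 0 || !(V.contains S))
       && P.all (fun item => (pyDict item).items.all (fun p =>
            p.1.toList.all (fun ch => V.contains (String.singleton ch) || T.contains (String.singleton ch))
            && p.1.toList.any (fun ch => V.contains (String.singleton ch))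
            && p.2.toList.all (fun ch => V.contains (String.singleton ch) || T.contains (String.singleton ch))))
       && P.any (fun item => (pyDict item).items.any (fun p => p.1 == S))) := by
  unfold is_valid_grammar_alt
  cases hg : (V.isEmpty || T.isEmpty || P.isEmpty) with
  | true =>
          rw [if_pos rfl]
          rfl
  | false =>
      rw [if_neg Bool.false_ne_true, bBuildT_eq]
      cases h1 : (T.any fun t => decide (1 < PySem.Str.len t)) with
      | true =>
          rw [if_pos rfl]
          rfl
      | false =>
          rw [if_neg Bool.false_ne_true]
          dsimp only
          rw [bBuildV_eq]
          simp only [pv_dT_false]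
          cases h2 : (V.any fun v => decide (1 < PySem.Str.len v) || T.contains v) with
          | true =>
          rw [if_pos rfl]
          rfl
          | false =>
              rw [if_neg Bool.false_ne_true]
              dsimp only
              rw [pv_kind_true]
              cases h3 : (PySem.Str.len S == 0 || !(V.contains S)) with
              | true =>
          rw [if_pos rfl]
          rfl
              | false =>
                  rw [if_neg Bool.false_ne_true, bProdLoop_eq]
                  simp only [pv_kind_isSome, pv_kind_contains, pv_kind_true]
                  cases h4 : P.all (fun item => (pyDict item).items.all (fun p =>
                      p.1.toList.all (fun ch => V.contains (String.singleton ch) || T.contains (String.singleton ch))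
                      && p.1.toList.any (fun ch => V.contains (String.singleton ch))
                      && p.2.toList.all (fun ch => V.contains (String.singleton ch) || T.contains (String.singleton ch)))) with
                  | false =>
                      rw [if_neg Bool.false_ne_true]
                      rfl
                  | true =>
                      rw [if_pos rfl]
                      dsimp only
                      rw [pv_contains_prod_fold]
                      rfl

-- A in canonical boolean form
theorem a_eq_canon (V T : List String) (P : List (List (String × String))) (S : String) :
    is_valid_grammar V T P S =
      (!(V.isEmpty)
       && !(V.any fun c => decide (1 < PySem.Str.len c))
       && !(T.isEmpty)
       && !(T.any fun c => decide (1 < PySem.Str.len c))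
       && !(T.any fun i => V.contains i)
       && !(P.isEmpty)
       && P.all (fun item => (pyDict item).items.all
            (fun p => p.1.toList.any (fun i => V.contains (String.singleton i))))
       && P.all (fun item => (pyDict item).items.all
            (fun p => (p.1.toList ++ p.2.toList).all
              (fun i => V.contains (String.singleton i) || T.contains (String.singleton i))))
       && !(PySem.Str.len S == 0 || !(V.contains S))
       && P.any (fun item => (pyDict item).items.any (fun p => p.1 == S))) := by
  unfold is_valid_grammar
  rw [aLenLoop_eq V, aLenLoop_eq T, aMemLoop_eq, aLoop4_eq, aLoop5_eq, aKeysOf_contains]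
  simp only [pv_ite_false, pv_len_beq_zero, Bool.not_not, Bool.and_true]
  simp only [Bool.and_assoc]

-- ===== VERDICT (by name: the statement is the Claim_ definition above) =====
set_option maxHeartbeats 1000000 in
theorem is_valid_grammar_spec : Claim_equal_is_valid_grammar := by
  intro V T P S _
  unfold Spec_is_valid_grammar
  rw [a_eq_canon, alt_eq_canon]
  simp only [Bool.not_or, pv_any_or, List.all_append, pv_all_and, pv_any_comm V T, Bool.not_not]
  simp only [Bool.and_assoc]
  simp only [Bool.and_comm, Bool.and_left_comm, Bool.and_assoc]
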